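-- pv_equiv track=rewrite | github.com/dijksterhuis/cleverspeech-py | data/reporting/logs_report.py | find_first_and_last_success_and_zeroth_step
-- ===== SOURCE A (Python) =====
-- def find_first_and_last_success_and_zeroth_step(data):
--
--     first_successful_steps = dict()
--     last_successful_steps = dict()
--     zeroth_step = dict()
--
--     for basename, step_dict in data.items():
--         for step, data in step_dict.items():
--
--             if step == 0:
--                 zeroth_step[basename] = step_dict
--
--             if data["success"] is True:
--                 if basename not in first_successful_steps.keys():
--                     first_successful_steps[basename] = step_dict
--                 else:
--                     last_successful_steps[basename] = step_dict
--             else: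
--                 pass
--
--     return first_successful_steps, last_successful_steps, zeroth_step
-- ===== SOURCE B (Python) =====
-- def find_first_and_last_success_and_zeroth_step(data):
--     first_successful_steps = {
--         basename: step_dict
--         for basename, step_dict in data.items()
--         if any(d["success"] is True for d in step_dict.values())
--     }
--     last_successful_steps = {
--         basename: step_dict
--         for basename, step_dict in data.items()
--         if sum(d["success"] is True for d in step_dict.values()) >= 2
--     }
--     zeroth_step = {
--         basename: step_dict
--         for basename, step_dict in data.items()
--         if 0 in step_dict
--     }
--     return first_successful_steps, last_successful_steps, zeroth_step
-- ===== Notes on version B (the rewrite author's own statement) =====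
-- stated objective: simpler
-- what changed: Replaces the single interleaved stateful loop (dict-membership state deciding first vs last) by three independent comprehensions over data.items(): any-success for first, success-count >= 2 for last, key 0 present for zeroth.
import Mathlib
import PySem

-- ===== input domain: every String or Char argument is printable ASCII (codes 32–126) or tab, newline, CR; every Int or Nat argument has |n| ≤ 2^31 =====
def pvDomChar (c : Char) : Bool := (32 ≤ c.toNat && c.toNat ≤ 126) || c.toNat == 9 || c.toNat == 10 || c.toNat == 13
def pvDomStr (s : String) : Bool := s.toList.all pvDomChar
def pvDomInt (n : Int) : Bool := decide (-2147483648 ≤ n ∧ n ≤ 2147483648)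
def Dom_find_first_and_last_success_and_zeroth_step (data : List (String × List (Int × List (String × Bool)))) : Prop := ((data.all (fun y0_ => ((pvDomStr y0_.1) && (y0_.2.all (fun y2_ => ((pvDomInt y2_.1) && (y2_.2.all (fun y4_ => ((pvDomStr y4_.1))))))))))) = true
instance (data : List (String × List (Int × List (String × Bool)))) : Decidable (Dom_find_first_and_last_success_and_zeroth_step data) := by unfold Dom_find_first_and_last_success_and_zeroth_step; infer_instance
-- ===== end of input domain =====

-- B replaces A's single interleaved stateful loop by three independent filter passes
-- (any-success / success-count >= 2 / key-0 present); objective: simpler, same cost.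

-- ===== PORT A =====
-- the inner 'for step, data in step_dict.items(): …' loop of A, with its three result dicts as state
def pvAInner (basename : String) (step_dict : List (Int × List (String × Bool)))
    (steps : List (Int × List (String × Bool)))
    (st : PySem.Dict String (List (Int × List (String × Bool))) ×
          PySem.Dict String (List (Int × List (String × Bool))) ×
          PySem.Dict String (List (Int × List (String × Bool)))) :
    PySem.Dict String (List (Int × List (String × Bool))) ×
    PySem.Dict String (List (Int × List (String × Bool))) ×
    PySem.Dict String (List (Int × List (String × Bool))) :=
  steps.foldl (fun st sp =>
    let z := if sp.1 == 0 then st.2.2.insert basename step_dict else st.2.2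
    if ((PySem.Dict.ofList sp.2).get? "success") == some true then
      if st.1.contains basename then (st.1, st.2.1.insert basename step_dict, z)
      else (st.1.insert basename step_dict, st.2.1, z)
    else (st.1, st.2.1, z)) st

def find_first_and_last_success_and_zeroth_step (data : List (String × List (Int × List (String × Bool)))) : (List (String × List (Int × List (String × Bool)))) × (List (String × List (Int × List (String × Bool)))) × (List (String × List (Int × List (String × Bool)))) :=
  let st := data.foldl (fun st bp => pvAInner bp.1 bp.2 bp.2 st)
    (PySem.Dict.empty, PySem.Dict.empty, PySem.Dict.empty)
  (st.1.items, st.2.1.items, st.2.2.items)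

-- ===== PORT B =====
def find_first_and_last_success_and_zeroth_step_alt (data : List (String × List (Int × List (String × Bool)))) : (List (String × List (Int × List (String × Bool)))) × (List (String × List (Int × List (String × Bool)))) × (List (String × List (Int × List (String × Bool)))) :=
  ( data.filter (fun bp => bp.2.any (fun sp => ((PySem.Dict.ofList sp.2).get? "success") == some true)),
    data.filter (fun bp => decide (2 ≤ bp.2.countP (fun sp => ((PySem.Dict.ofList sp.2).get? "success") == some true))),
    data.filter (fun bp => bp.2.any (fun sp => sp.1 == 0)) )

-- ===== PRECONDITION & SPEC =====
-- Pre_ excludes (a) inner step dicts missing the key "success", on which Python A raises KeyError,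
-- and (b) association lists with duplicate basenames, which no Python dict input can denote.
def Pre_find_first_and_last_success_and_zeroth_step (data : List (String × List (Int × List (String × Bool)))) : Prop :=
  (data.map Prod.fst).Nodup ∧
  ∀ bp ∈ data, ∀ sp ∈ bp.2, ((PySem.Dict.ofList sp.2).get? "success").isSome = true
instance (data : List (String × List (Int × List (String × Bool)))) : Decidable (Pre_find_first_and_last_success_and_zeroth_step data) := by unfold Pre_find_first_and_last_success_and_zeroth_step; infer_instance

def pvWitness_find_first_and_last_success_and_zeroth_step : (List (String × List (Int × List (String × Bool)))) :=
  [("a", [(0, [("success", true)]), (1, [("success", true)])]), ("b", [(2, [("success", false)])])]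

def Spec_find_first_and_last_success_and_zeroth_step (data : List (String × List (Int × List (String × Bool)))) (out : (List (String × List (Int × List (String × Bool)))) × (List (String × List (Int × List (String × Bool)))) × (List (String × List (Int × List (String × Bool))))) : Prop := out = find_first_and_last_success_and_zeroth_step_alt data
instance (data : List (String × List (Int × List (String × Bool)))) (out : (List (String × List (Int × List (String × Bool)))) × (List (String × List (Int × List (String × Bool)))) × (List (String × List (Int × List (String × Bool))))) : Decidable (Spec_find_first_and_last_success_and_zeroth_step data out) := by
  unfold Spec_find_first_and_last_success_and_zeroth_step
  -- the fully nested product/list DecidableEq exceeds the instance-search size limit; build it by hand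
  exact @instDecidableEqProd _ _ (fun a b => List.hasDecEq a b)
    (@instDecidableEqProd _ _ (fun a b => List.hasDecEq a b) (fun a b => List.hasDecEq a b)) out
    (find_first_and_last_success_and_zeroth_step_alt data)

-- ===== CLAIM (what is proved, stated in full; the proofs are below) =====
def Claim_equal_find_first_and_last_success_and_zeroth_step : Prop := ∀ (data : List (String × List (Int × List (String × Bool)))), Dom_find_first_and_last_success_and_zeroth_step data → Pre_find_first_and_last_success_and_zeroth_step data → Spec_find_first_and_last_success_and_zeroth_step data (find_first_and_last_success_and_zeroth_step data)

-- ===== LEMMAS AND PROOFS =====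

-- abbreviations for the two step predicates
def pvSucc (sp : Int × List (String × Bool)) : Bool :=
  ((PySem.Dict.ofList sp.2).get? "success") == some true
def pvZero (sp : Int × List (String × Bool)) : Bool := sp.1 == 0

-- the body of A's inner loop, as a named function (definitionally the foldl body of pvAInner)
def pvStepA (basename : String) (step_dict : List (Int × List (String × Bool)))
    (st : PySem.Dict String (List (Int × List (String × Bool))) ×
          PySem.Dict String (List (Int × List (String × Bool))) ×
          PySem.Dict String (List (Int × List (String × Bool))))
    (sp : Int × List (String × Bool)) :
    PySem.Dict String (List (Int × List (String × Bool))) ×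
    PySem.Dict String (List (Int × List (String × Bool))) ×
    PySem.Dict String (List (Int × List (String × Bool))) :=
  let z := if sp.1 == 0 then st.2.2.insert basename step_dict else st.2.2
  if ((PySem.Dict.ofList sp.2).get? "success") == some true then
    if st.1.contains basename then (st.1, st.2.1.insert basename step_dict, z)
    else (st.1.insert basename step_dict, st.2.1, z)
  else (st.1, st.2.1, z)

theorem pvAInner_cons (b : String) (sd : List (Int × List (String × Bool)))
    (sp : Int × List (String × Bool)) (rest : List (Int × List (String × Bool)))
    (st : PySem.Dict String (List (Int × List (String × Bool))) ×
          PySem.Dict String (List (Int × List (String × Bool))) ×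
          PySem.Dict String (List (Int × List (String × Bool)))) :
    pvAInner b sd (sp :: rest) st = pvAInner b sd rest (pvStepA b sd st sp) := rfl

-- once basename is already a key of the 'first' dict, the inner loop only feeds 'last'/'zeroth'
theorem pvAInner_mem {b : String} {sd : List (Int × List (String × Bool))}
    (steps : List (Int × List (String × Bool)))
    (f l z : PySem.Dict String (List (Int × List (String × Bool))))
    (hf : f.contains b = true) :
    pvAInner b sd steps (f, l, z) =
      ( f,
        if steps.any pvSucc then l.insert b sd else l,
        if steps.any pvZero then z.insert b sd else z ) := by
  induction steps generalizing l z with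
  | nil => simp [pvAInner]
  | cons sp rest ih =>
    rw [pvAInner_cons]
    have hstep : pvStepA b sd (f, l, z) sp =
        (f, if pvSucc sp then l.insert b sd else l, if pvZero sp then z.insert b sd else z) := by
      by_cases hs : pvSucc sp = true <;> by_cases h0 : pvZero sp = true <;>
        simp_all [pvStepA, pvSucc, pvZero]
    rw [hstep]
    by_cases hs : pvSucc sp = true <;> by_cases h0 : pvZero sp = true <;>
      by_cases hr : rest.any pvSucc = true <;> by_cases hz0 : rest.any pvZero = true <;>
      simp [hs, h0, hr, hz0, ih, List.any_cons, PySem.Dict.insert_insert_self]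

-- a basename not yet seen: first success inserts into 'first', later successes into 'last'
theorem pvAInner_fresh {b : String} {sd : List (Int × List (String × Bool))}
    (steps : List (Int × List (String × Bool)))
    (f l z : PySem.Dict String (List (Int × List (String × Bool))))
    (hf : f.contains b = false) :
    pvAInner b sd steps (f, l, z) =
      ( if steps.any pvSucc then f.insert b sd else f,
        if 2 ≤ steps.countP pvSucc then l.insert b sd else l,
        if steps.any pvZero then z.insert b sd else z ) := by
  induction steps generalizing z with
  | nil => simp [pvAInner]
  | cons sp rest ih =>
    have hcnt : (2 ≤ rest.countP pvSucc + 1) ↔ (rest.any pvSucc = true) := by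
      rw [List.any_eq_true]
      constructor
      · intro h
        obtain ⟨x, hx, hpx⟩ := List.countP_pos_iff.mp (show 0 < rest.countP pvSucc by omega)
        exact ⟨x, hx, hpx⟩
      · intro ⟨x, hx, hpx⟩
        have := List.countP_pos_iff.mpr ⟨x, hx, hpx⟩
        omega
    have hmem := fun l z => pvAInner_mem (b := b) (sd := sd) rest (f.insert b sd) l z
      (PySem.Dict.contains_insert_self _ _ _)
    rw [pvAInner_cons]
    by_cases hs : pvSucc sp = true
    · have hstep : pvStepA b sd (f, l, z) sp =
          (f.insert b sd, l, if pvZero sp then z.insert b sd else z) := by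
        by_cases h0 : pvZero sp = true <;> simp_all [pvStepA, pvSucc, pvZero]
      rw [hstep]
      by_cases h0 : pvZero sp = true <;>
        by_cases hr : rest.any pvSucc = true <;> by_cases hz0 : rest.any pvZero = true <;>
        simp [hs, h0, hr, hz0, hmem, hcnt, List.any_cons,
              PySem.Dict.insert_insert_self]
    · have hs' : pvSucc sp = false := by simpa using hs
      have hstep : pvStepA b sd (f, l, z) sp =
          (f, l, if pvZero sp then z.insert b sd else z) := by
        by_cases h0 : pvZero sp = true <;> simp_all [pvStepA, pvSucc, pvZero]
      rw [hstep]
      by_cases h0 : pvZero sp = true <;>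
        by_cases hz0 : rest.any pvZero = true <;>
        simp only [List.any_cons, List.countP_cons, hs', Bool.false_or, Bool.false_eq_true, ite_false, Nat.add_zero] <;>
        simp [h0, hz0, ih, PySem.Dict.insert_insert_self]

-- the outer loop over fresh distinct basenames appends the three filtered entries
theorem pvOuter (data : List (String × List (Int × List (String × Bool))))
    (f l z : PySem.Dict String (List (Int × List (String × Bool))))
    (hnd : (data.map Prod.fst).Nodup)
    (hf : ∀ bp ∈ data, f.contains bp.1 = false)
    (hl : ∀ bp ∈ data, l.contains bp.1 = false)
    (hz : ∀ bp ∈ data, z.contains bp.1 = false) :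
    data.foldl (fun st bp => pvAInner bp.1 bp.2 bp.2 st) (f, l, z) =
      ( PySem.Dict.mk (f.items ++ data.filter (fun bp => bp.2.any pvSucc)),
        PySem.Dict.mk (l.items ++ data.filter (fun bp => decide (2 ≤ bp.2.countP pvSucc))),
        PySem.Dict.mk (z.items ++ data.filter (fun bp => bp.2.any pvZero)) ) := by
  induction data generalizing f l z with
  | nil => simp
  | cons bp rest ih =>
    obtain ⟨b, sd⟩ := bp
    simp only [List.map_cons, List.nodup_cons, List.mem_map] at hnd
    have hne : ∀ bp' ∈ rest, bp'.1 ≠ b := fun bp' h he => hnd.1 ⟨bp', h, he⟩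
    have hcont : ∀ (d : PySem.Dict String (List (Int × List (String × Bool)))) (c : Prop)
        [Decidable c],
        (∀ bp' ∈ rest, d.contains bp'.1 = false) →
        ∀ bp' ∈ rest, (if c then d.insert b sd else d).contains bp'.1 = false := by
      intro d c _ hd bp' hbp'
      by_cases hc : c
      · simp only [if_pos hc, PySem.Dict.contains_insert]
        simp [hne bp' hbp', hd bp' hbp']
      · simpa [if_neg hc] using hd bp' hbp'
    have hitems : ∀ (d : PySem.Dict String (List (Int × List (String × Bool)))) (c : Prop)
        [Decidable c],
        d.contains b = false →
        (if c then d.insert b sd else d).items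
          = d.items ++ (if c then [(b, sd)] else []) := by
      intro d c _ hd
      by_cases hc : c
      · simp [if_pos hc, PySem.Dict.items_insert, hd]
      · simp [if_neg hc]
    rw [List.foldl_cons, pvAInner_fresh sd f l z (hf (b, sd) (List.mem_cons_self ..))]
    rw [ih _ _ _ hnd.2
      (hcont f _ (fun bp' h => hf bp' (List.mem_cons_of_mem _ h)))
      (hcont l _ (fun bp' h => hl bp' (List.mem_cons_of_mem _ h)))
      (hcont z _ (fun bp' h => hz bp' (List.mem_cons_of_mem _ h)))]
    rw [hitems f _ (hf (b, sd) (List.mem_cons_self ..)),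
        hitems l _ (hl (b, sd) (List.mem_cons_self ..)),
        hitems z _ (hz (b, sd) (List.mem_cons_self ..))]
    simp only [List.filter_cons, Prod.mk.injEq]
    refine ⟨?_, ?_, ?_⟩ <;> (congr 1; split <;> simp <;> omega)

-- ===== VERDICT (by name: the statement is the Claim_ definition above) =====
theorem find_first_and_last_success_and_zeroth_step_spec : Claim_equal_find_first_and_last_success_and_zeroth_step := by
  intro data _ pre
  unfold Spec_find_first_and_last_success_and_zeroth_step
  unfold find_first_and_last_success_and_zeroth_step
  rw [pvOuter data _ _ _ pre.1 (by simp) (by simp) (by simp)]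
  simp [find_first_and_last_success_and_zeroth_step_alt]
  exact ⟨rfl, rfl, rfl⟩
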